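-- pv_equiv track=rewrite | github.com/tetsuo-komatsuzaki/music-app | scripts/generate_arpeggio_mxl.py | find_arpeggio_start
-- ===== SOURCE A (Python) =====
-- VIOLIN_LOW  = 55   # G3
--
-- VIOLIN_HIGH = 100  # E7
--
-- def find_arpeggio_start(root_semi, target_oct):
--     """
--     バイオリン音域内に収まる最低の開始MIDIノートを返す。
--     スケールと同様に低いオクターブから順に試す。
--     """
--     span = target_oct * 12  # ルートから最高音（オクターブ上のルート）までの半音数
--     # 完全に音域内に収まる最低オクターブを探す
--     for start_oct in range(2, 8):
--         base = start_oct * 12 + root_semi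
--         top  = base + span
--         if base >= VIOLIN_LOW and top <= VIOLIN_HIGH:
--             return base
--     # 完全に収まらない場合: ルート音がVIOLIN_LOW以上の最低オクターブ
--     for start_oct in range(2, 8):
--         base = start_oct * 12 + root_semi
--         if base >= VIOLIN_LOW:
--             return base
--     return VIOLIN_LOW
-- ===== SOURCE B (Python) =====
-- VIOLIN_LOW  = 55   # G3
-- VIOLIN_HIGH = 100  # E7
--
-- def find_arpeggio_start(root_semi, target_oct):
--     # Closed form: the smallest octave (capped below at 2) whose base reaches
--     # VIOLIN_LOW; both of A's loops return the base of exactly that octave,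
--     # and the result does not depend on target_oct.
--     start = max(2, -((root_semi - 55) // 12))  # ceil((55 - root_semi) / 12)
--     return 12 * start + root_semi if start <= 7 else 55
-- ===== Notes on version B (the rewrite author's own statement) =====
-- stated objective: simpler
-- what changed: Replaced A's two sequential scans over octaves 2..7 with a closed-form ceiling-division computation of the lowest octave whose base reaches VIOLIN_LOW (the result never depends on target_oct, since whenever the span check fails at that octave it fails at all higher ones and the fallback loop returns the same base).
import Mathlib
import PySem

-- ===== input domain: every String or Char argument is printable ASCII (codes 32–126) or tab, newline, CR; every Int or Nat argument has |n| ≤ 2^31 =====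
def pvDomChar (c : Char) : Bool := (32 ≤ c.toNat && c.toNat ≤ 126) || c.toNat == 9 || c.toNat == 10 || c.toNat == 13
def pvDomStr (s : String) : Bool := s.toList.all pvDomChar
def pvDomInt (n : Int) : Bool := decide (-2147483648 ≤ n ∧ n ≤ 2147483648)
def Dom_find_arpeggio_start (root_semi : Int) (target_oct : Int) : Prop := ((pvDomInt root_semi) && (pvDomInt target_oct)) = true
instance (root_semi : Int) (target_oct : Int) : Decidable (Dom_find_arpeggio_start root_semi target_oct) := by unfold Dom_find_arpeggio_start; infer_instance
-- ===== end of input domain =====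

-- B replaces A's two sequential octave scans with one closed-form ceiling-division formula (simpler).


-- ===== PORT A =====
-- Each early-return 'for' loop over range(2, 8) is ported as the obvious structural
-- recursion over the pyRange list, returning Option Int (some = early return).
def pvLoop1 (root_semi : Int) (span : Int) : List Int → Option Int
  | [] => none
  | start_oct :: rest =>
    if start_oct * 12 + root_semi ≥ 55 ∧ start_oct * 12 + root_semi + span ≤ 100 then
      some (start_oct * 12 + root_semi)
    else pvLoop1 root_semi span rest

def pvLoop2 (root_semi : Int) : List Int → Option Int
  | [] => none
  | start_oct :: rest =>
    if start_oct * 12 + root_semi ≥ 55 then some (start_oct * 12 + root_semi)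
    else pvLoop2 root_semi rest

def find_arpeggio_start (root_semi : Int) (target_oct : Int) : Int :=
  let span := target_oct * 12
  match pvLoop1 root_semi span (PySem.List.pyRange 2 8 1) with
  | some base => base
  | none =>
    match pvLoop2 root_semi (PySem.List.pyRange 2 8 1) with
    | some base => base
    | none => 55

-- ===== PORT B =====
def find_arpeggio_start_alt (root_semi : Int) (target_oct : Int) : Int :=
  let start := max 2 (-(PySem.Int.floordiv (root_semi - 55) 12))
  if start ≤ 7 then 12 * start + root_semi else 55

-- ===== PRECONDITION & SPEC =====
def Spec_find_arpeggio_start (root_semi : Int) (target_oct : Int) (out : Int) : Prop := out = find_arpeggio_start_alt root_semi target_oct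
instance (root_semi : Int) (target_oct : Int) (out : Int) : Decidable (Spec_find_arpeggio_start root_semi target_oct out) := by unfold Spec_find_arpeggio_start; infer_instance

-- ===== CLAIM (what is proved, stated in full; the proofs are below) =====
def Claim_equal_find_arpeggio_start : Prop := ∀ (root_semi : Int) (target_oct : Int), Dom_find_arpeggio_start root_semi target_oct → Spec_find_arpeggio_start root_semi target_oct (find_arpeggio_start root_semi target_oct)

-- ===== LEMMAS AND PROOFS =====
theorem pvRange28 : PySem.List.pyRange 2 8 1 = [2, 3, 4, 5, 6, 7] := by decide

-- ===== VERDICT (by name: the statement is the Claim_ definition above) =====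
set_option maxHeartbeats 2000000 in
theorem find_arpeggio_start_spec : Claim_equal_find_arpeggio_start := by
  intro r t _
  unfold Spec_find_arpeggio_start find_arpeggio_start find_arpeggio_start_alt
  have hc : PySem.Int.floordiv (r - 55) 12 = PySem.Int.floordiv (-(55 - r)) 12 := by ring_nf
  have hb := (PySem.Int.neg_floordiv_neg_eq_iff_of_pos (a := 55 - r) (b := 12)
      (q := -(PySem.Int.floordiv (-(55 - r)) 12)) (by norm_num)).mp rfl
  rw [pvRange28, hc]
  simp only [pvLoop1, pvLoop2]
  split_ifs <;> simp <;> omega
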